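-- pv_equiv track=rewrite | github.com/dkim845/euler-cipher | decrypt.py | decrypt_adj_matrix
-- ===== SOURCE A (Python) =====
-- def decrypt_adj_matrix(matrix):
--     letter = ''
--     for x in matrix:
--         letter += '1'
--         if x != '1':
--             for y in range(0, int(x)-1):
--                 letter += '0'
--     return chr(int(letter, 2))
-- ===== SOURCE B (Python) =====
-- def decrypt_adj_matrix(matrix):
--     # Accumulate the code point arithmetically instead of building a binary
--     # string: appending '1' followed by (n-1) zeros to the string is the same
--     # as shifting the accumulated value left by n and setting bit n-1
--     # (n = int(x) clamped to at least 1, since a non-positive int(x) appends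
--     # no zeros, exactly like x == '1').
--     code = 0
--     for x in matrix:
--         n = max(int(x), 1)
--         code = (code << n) + (1 << (n - 1))
--     return chr(code)
-- ===== Notes on version B (the rewrite author's own statement) =====
-- stated objective: alternative
-- what changed: B replaces A's binary-string construction plus int(s,2) reparse with a single arithmetic accumulator: code = (code << n) + (1 << (n-1)) with n = max(int(x),1), then chr(code).
import Mathlib
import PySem

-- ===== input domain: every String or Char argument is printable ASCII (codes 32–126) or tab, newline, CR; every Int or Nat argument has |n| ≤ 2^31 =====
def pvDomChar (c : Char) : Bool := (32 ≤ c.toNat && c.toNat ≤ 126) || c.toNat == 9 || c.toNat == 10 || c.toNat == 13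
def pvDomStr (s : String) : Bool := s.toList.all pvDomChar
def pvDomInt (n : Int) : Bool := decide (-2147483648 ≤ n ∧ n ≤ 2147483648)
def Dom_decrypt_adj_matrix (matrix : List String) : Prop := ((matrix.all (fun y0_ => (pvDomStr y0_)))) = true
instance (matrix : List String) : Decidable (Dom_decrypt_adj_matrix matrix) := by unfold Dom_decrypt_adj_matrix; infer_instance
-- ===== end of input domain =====

-- B replaces A's binary-string building + int(s,2) reparse by one arithmetic
-- accumulator (shift left by n, set bit n-1); equivalence of the two ports is
-- proved on all non-empty integer-string matrices whose decoded code point is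
-- a valid non-surrogate chr() argument.


-- ===== PORT A =====
-- int(letter, 2): hand-ported as the base-2 digit fold; exact on the strings A
-- builds inside Pre_ (non-empty, only '0'/'1' characters, no sign/space/underscore).
def pvBinVal (cs : List Char) : Nat :=
  cs.foldl (fun a c => 2 * a + (if c = '1' then 1 else 0)) 0

-- the for-loop of A: letter += '1'; if x != '1': letter += '0' * len(range(0, int(x)-1));
-- none = the ValueError of int(x).
def pvLoopA : List String → List Char → Option (List Char)
  | [], letter => some letter
  | x :: rest, letter =>
      let letter := letter ++ ['1']
      if x = "1" then pvLoopA rest letter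
      else
        match PySem.Int.ofStr? x with
        | none => none
        | some k => pvLoopA rest (letter ++ List.replicate (k - 1).toNat '0')

def decrypt_adj_matrix (matrix : List String) : String :=
  match pvLoopA matrix [] with
  | none => ""                      -- int(x) raised: outside Pre_
  | some letter =>
      if letter = [] then ""        -- int('', 2) raises: outside Pre_
      else String.ofList [Char.ofNat (pvBinVal letter)]   -- chr(int(letter, 2))

-- ===== PORT B =====
-- the for-loop of B: code = (code << n) + (1 << (n-1)), n = max(int(x), 1).
def pvLoopB : List String → Nat → Option Nat
  | [], code => some code
  | x :: rest, code =>
      match PySem.Int.ofStr? x with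
      | none => none
      | some k =>
          let n := (max k 1).toNat
          pvLoopB rest (code <<< n + 1 <<< (n - 1))

def decrypt_adj_matrix_alt (matrix : List String) : String :=
  match pvLoopB matrix 0 with
  | none => ""
  | some code => String.ofList [Char.ofNat code]          -- chr(code)

-- ===== PRECONDITION & SPEC =====
-- n contributed by element x: max(int(x), 1) (a non-positive int(x) appends no zeros).
def pvN? (x : String) : Option Nat := (PySem.Int.ofStr? x).map (fun k => (max k 1).toNat)

-- closed form of the decoded code point: Σ_i 2^((Σ_{j≥i} n_j) - 1)
def pvSuffixCode : List Nat → Nat × Nat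
  | [] => (0, 0)
  | n :: rest =>
      let p := pvSuffixCode rest
      (n + p.1, p.2 + 2 ^ (n + p.1 - 1))

-- capped: the code point has exactly Σ n_i bits, so if Σ n_i > 21 it already
-- exceeds 0x10FFFF; the cap keeps the condition cheap to evaluate.
def pvCodeOf (ns : List Nat) : Nat :=
  if ns.sum ≤ 21 then (pvSuffixCode ns).2 else 2 ^ 22

-- Pre_ excludes: the empty matrix (int('',2) raises ValueError), matrices with a
-- non-integer string (int(x) raises ValueError), code points above 0x10FFFF
-- (chr raises ValueError), and the lone-surrogate band 0xD800–0xDFFF, where A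
-- returns a one-character str that is not representable as a Lean String.
def Pre_decrypt_adj_matrix (matrix : List String) : Prop :=
  matrix ≠ [] ∧ (matrix.mapM pvN?).isSome = true ∧
    (pvCodeOf ((matrix.mapM pvN?).getD []) ≤ 1114111 ∧
     ¬ (55296 ≤ pvCodeOf ((matrix.mapM pvN?).getD []) ∧
        pvCodeOf ((matrix.mapM pvN?).getD []) < 57344))
instance (matrix : List String) : Decidable (Pre_decrypt_adj_matrix matrix) := by
  unfold Pre_decrypt_adj_matrix; infer_instance

def pvWitness_decrypt_adj_matrix : List String := ["3", "1"]

def Spec_decrypt_adj_matrix (matrix : List String) (out : String) : Prop := out = decrypt_adj_matrix_alt matrix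
instance (matrix : List String) (out : String) : Decidable (Spec_decrypt_adj_matrix matrix out) := by unfold Spec_decrypt_adj_matrix; infer_instance

-- ===== CLAIM (what is proved, stated in full; the proofs are below) =====
def Claim_equal_decrypt_adj_matrix : Prop := ∀ (matrix : List String), Dom_decrypt_adj_matrix matrix → Pre_decrypt_adj_matrix matrix → Spec_decrypt_adj_matrix matrix (decrypt_adj_matrix matrix)

-- ===== LEMMAS AND PROOFS =====
-- the letter string A builds for the parsed block lengths ns
def pvBlocks (ns : List Nat) : List Char :=
  ns.flatMap (fun n => '1' :: List.replicate (n - 1) '0')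

theorem pvLoopA_eq (matrix : List String) : ∀ (letter : List Char) (ns : List Nat),
    matrix.mapM pvN? = some ns → pvLoopA matrix letter = some (letter ++ pvBlocks ns) := by
  induction matrix with
  | nil =>
      intro letter ns h
      simp at h
      subst h
      simp [pvLoopA, pvBlocks]
  | cons x rest ih =>
      intro letter ns h
      rw [List.mapM_cons] at h
      cases hx : pvN? x with
      | none => simp [hx] at h
      | some n =>
          rw [hx] at h
          cases hr : rest.mapM pvN? with
          | none => simp [hr] at h
          | some ns' =>
              rw [hr] at h
              simp at h
              obtain ⟨k, hk, hor⟩ := (Option.map_eq_some_iff).mp hx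
              by_cases h1 : x = "1"
              · have hk1 : PySem.Int.ofStr? x = some 1 := by subst h1; decide
                have hn1 : n = 1 := by
                  rw [hk1] at hk
                  injection hk with hk
                  omega
                simp [pvLoopA, h1, ih _ _ hr, ← h, pvBlocks, hn1]
              · have hrep : (k - 1).toNat = n - 1 := by omega
                simp [pvLoopA, h1, hk, ih _ _ hr, ← h, pvBlocks, hrep]

theorem pvLoopB_eq (matrix : List String) : ∀ (code : Nat) (ns : List Nat),
    matrix.mapM pvN? = some ns →
    pvLoopB matrix code = some (ns.foldl (fun c n => c <<< n + 1 <<< (n - 1)) code) := by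
  induction matrix with
  | nil =>
      intro code ns h
      simp at h
      subst h
      simp [pvLoopB]
  | cons x rest ih =>
      intro code ns h
      rw [List.mapM_cons] at h
      cases hx : pvN? x with
      | none => simp [hx] at h
      | some n =>
          rw [hx] at h
          cases hr : rest.mapM pvN? with
          | none => simp [hr] at h
          | some ns' =>
              rw [hr] at h
              simp at h
              obtain ⟨k, hk, hor⟩ := (Option.map_eq_some_iff).mp hx
              simp only [pvLoopB, hk]
              rw [hor, ih _ _ hr, ← h, List.foldl_cons]

theorem pvN_pos (matrix : List String) : ∀ (ns : List Nat),
    matrix.mapM pvN? = some ns → ∀ n ∈ ns, 1 ≤ n := by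
  induction matrix with
  | nil =>
      intro ns h
      simp at h
      subst h
      simp
  | cons x rest ih =>
      intro ns h
      rw [List.mapM_cons] at h
      cases hx : pvN? x with
      | none => simp [hx] at h
      | some n =>
          rw [hx] at h
          cases hr : rest.mapM pvN? with
          | none => simp [hr] at h
          | some ns' =>
              rw [hr] at h
              simp at h
              obtain ⟨k, hk, hor⟩ := (Option.map_eq_some_iff).mp hx
              intro m hm
              rw [← h] at hm
              rcases List.mem_cons.mp hm with h' | h'
              · omega
              · exact ih _ hr m h'

theorem pvBinVal_zeros (m : Nat) : ∀ (a : Nat),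
    List.foldl (fun a c => 2 * a + (if c = '1' then 1 else 0)) a (List.replicate m '0') = a * 2 ^ m := by
  induction m with
  | zero => intro a; simp
  | succ m ih =>
      intro a
      simp only [List.replicate_succ, List.foldl_cons]
      rw [if_neg (by decide), ih, pow_succ]
      ring

theorem pvBinVal_blocks (ns : List Nat) : ∀ (a : Nat), (∀ n ∈ ns, 1 ≤ n) →
    List.foldl (fun a c => 2 * a + (if c = '1' then 1 else 0)) a (pvBlocks ns)
      = ns.foldl (fun c n => c <<< n + 1 <<< (n - 1)) a := by
  induction ns with
  | nil => intro a _; simp [pvBlocks]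
  | cons n ns ih =>
      intro a hpos
      have hn : 1 ≤ n := hpos n (by simp)
      simp only [pvBlocks, List.flatMap_cons] at *
      rw [List.foldl_append, List.foldl_cons, pvBinVal_zeros, List.foldl_cons,
          ih _ (fun m hm => hpos m (List.mem_cons_of_mem _ hm))]
      congr 1
      norm_num [Nat.shiftLeft_eq]
      have h2 : 2 ^ n = 2 ^ (n - 1) * 2 := by
        rw [← pow_succ]
        congr 1
        omega
      rw [h2]
      ring

theorem pvBlocks_ne_nil (n : Nat) (ns : List Nat) : pvBlocks (n :: ns) ≠ [] := by
  simp [pvBlocks]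

-- ===== VERDICT (by name: the statement is the Claim_ definition above) =====
theorem decrypt_adj_matrix_spec : Claim_equal_decrypt_adj_matrix := by
  intro matrix _ hpre
  obtain ⟨hne, hsome, _⟩ := hpre
  obtain ⟨ns, hns⟩ := Option.isSome_iff_exists.mp hsome
  unfold Spec_decrypt_adj_matrix decrypt_adj_matrix decrypt_adj_matrix_alt
  rw [pvLoopA_eq matrix [] ns hns, pvLoopB_eq matrix 0 ns hns]
  have hns_ne : ns ≠ [] := by
    intro h; subst h
    cases matrix with
    | nil => exact hne rfl
    | cons x rest =>
        rw [List.mapM_cons] at hns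
        cases hx : pvN? x with
        | none => rw [hx] at hns; simp at hns
        | some n =>
            rw [hx] at hns
            cases hr : rest.mapM pvN? with
            | none => rw [hr] at hns; simp at hns
            | some ns' => rw [hr] at hns; simp at hns
  cases ns with
  | nil => exact absurd rfl hns_ne
  | cons n ns' =>
      simp only [List.nil_append]
      rw [if_neg (pvBlocks_ne_nil n ns')]
      unfold pvBinVal
      rw [pvBinVal_blocks _ 0 (pvN_pos matrix _ hns)]
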